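-- pv_equiv track=rewrite | github.com/aibo3269/AlgoHW7 | stringAlgos.py | commonSubstrings
-- ===== SOURCE A (Python) =====
-- def commonSubstrings(x, L, a):
-- 	substrings = []
-- 	substring = ""
-- 	i = 0
-- 	for op in a:
-- 		if(op[:6] != "Insert"):
-- 			if(op == "no-op"):
-- 				substring += x[i]
-- 				i += 1
-- 			else:
-- 				if(len(substring) >= L):
-- 					substrings.append(substring)
-- 				substring = ""
-- 				i += 1
-- 		else:
-- 			if(len(substring) >= L):
-- 				substrings.append(substring)
-- 			substring = ""
-- 	if(substring != ""):
-- 		substrings.append(substring)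
-- 	return substrings
-- ===== SOURCE B (Python) =====
-- def commonSubstrings(x, L, a):
--     # Phase 1: split the op stream into segment descriptors (start, length):
--     # maximal stretches of no-ops between boundary ops (Insert* or other).
--     segs = []
--     start = 0
--     n = 0
--     i = 0
--     for op in a:
--         if op[:6] == "Insert":
--             segs.append((start, n))
--             start, n = i, 0
--         elif op == "no-op":
--             n += 1
--             i += 1
--         else:
--             segs.append((start, n))
--             i += 1
--             start, n = i, 0
--     # Phase 2: slice x; closed segments pass the length filter, the trailing
--     # segment is kept whenever nonempty.
--     res = [x[s:s + m] for (s, m) in segs if m >= L]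
--     last = x[start:start + n]
--     if last:
--         res.append(last)
--     return res
-- ===== Notes on version B (the rewrite author's own statement) =====
-- stated objective: alternative
-- what changed: Replaces A's char-by-char accumulator with a two-phase decomposition: one pass records (start,length) segment descriptors between boundary ops, then the result is produced by slicing x, filtering closed segments by L and flushing the nonempty trailing segment.
import Mathlib
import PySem

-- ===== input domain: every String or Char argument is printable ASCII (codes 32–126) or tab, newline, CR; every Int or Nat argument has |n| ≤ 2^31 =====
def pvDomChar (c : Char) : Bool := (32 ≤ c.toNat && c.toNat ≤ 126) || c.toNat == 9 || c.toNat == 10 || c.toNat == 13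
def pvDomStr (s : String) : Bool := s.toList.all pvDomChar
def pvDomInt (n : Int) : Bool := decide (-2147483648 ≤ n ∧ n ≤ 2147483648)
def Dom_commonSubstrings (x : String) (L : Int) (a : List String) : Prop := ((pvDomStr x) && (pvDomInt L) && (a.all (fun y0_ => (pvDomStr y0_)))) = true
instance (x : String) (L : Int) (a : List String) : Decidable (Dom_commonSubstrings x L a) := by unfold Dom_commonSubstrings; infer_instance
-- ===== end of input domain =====

-- B replaces A's char-by-char accumulator by a two-phase segment decomposition
-- (record (start,length) descriptors, then slice/filter); objective: alternative.
-- ===== PORT A =====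
-- A's loop body; state (substrings, substring, i); strings handled as List Char.
def pvStepA (x : List Char) (L : Int) :
    (List (List Char) × List Char × Int) → String → (List (List Char) × List Char × Int) :=
  fun st op =>
    match st with
    | (subs, sub, i) =>
    if PySem.Str.slice op (some 0) (some 6) ≠ "Insert" then
      if op = "no-op" then
        match PySem.List.pyGet? x i with
        | some c => (subs, sub ++ [c], i + 1)          -- substring += x[i]; i += 1
        | none => (subs, sub, i + 1)                   -- x[i] raises IndexError: excluded by Pre_
      else
        ((if L ≤ (sub.length : Int) then subs ++ [sub] else subs), [], i + 1)
    else
      ((if L ≤ (sub.length : Int) then subs ++ [sub] else subs), [], i)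

-- A's trailing flush: append substring when nonempty.
def pvFinishA (r : List (List Char) × List Char × Int) : List (List Char) :=
  if r.2.1 ≠ [] then r.1 ++ [r.2.1] else r.1

def commonSubstrings (x : String) (L : Int) (a : List String) : List String :=
  (pvFinishA (a.foldl (pvStepA x.toList L) ([], [], 0))).map String.ofList

-- ===== PORT B =====
-- B's phase 1: state (segs, start, n, i).
def pvStepB : (List (Int × Int) × Int × Int × Int) → String → (List (Int × Int) × Int × Int × Int) :=
  fun st op =>
    match st with
    | (segs, start, n, i) =>
    if PySem.Str.slice op (some 0) (some 6) = "Insert" then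
      (segs ++ [(start, n)], i, 0, i)
    else if op = "no-op" then
      (segs, start, n + 1, i + 1)
    else
      (segs ++ [(start, n)], i + 1, 0, i + 1)

-- B's phase 2: slice, filter by L, flush the nonempty trailing segment.
def pvFinishB (x : List Char) (L : Int) (r : List (Int × Int) × Int × Int × Int) : List (List Char) :=
  let res := (r.1.filter (fun p => decide (L ≤ p.2))).map
      (fun p => PySem.List.slice x (some p.1) (some (p.1 + p.2)))
  let last := PySem.List.slice x (some r.2.1) (some (r.2.1 + r.2.2.1))
  if last ≠ [] then res ++ [last] else res

def commonSubstrings_alt (x : String) (L : Int) (a : List String) : List String :=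
  (pvFinishB x.toList L (a.foldl pvStepB ([], 0, 0, 0))).map String.ofList

-- ===== PRECONDITION & SPEC =====
-- Pre_ excludes exactly the inputs where A raises IndexError: some "no-op" op reads x[i]
-- with i (= number of preceding non-Insert ops) at or past the end of x.
def Pre_commonSubstrings (x : String) (L : Int) (a : List String) : Prop :=
  ∀ p ∈ List.range a.length, a.getD p "" = "no-op" →
    (a.take p).countP (fun op => PySem.Str.slice op (some 0) (some 6) != "Insert") < x.toList.length
instance (x : String) (L : Int) (a : List String) : Decidable (Pre_commonSubstrings x L a) := by
  unfold Pre_commonSubstrings; infer_instance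

def pvWitness_commonSubstrings : String × Int × List String :=
  ("abcd", 1, ["no-op", "Delete", "no-op", "Insert q", "no-op"])

def Spec_commonSubstrings (x : String) (L : Int) (a : List String) (out : List String) : Prop := out = commonSubstrings_alt x L a
instance (x : String) (L : Int) (a : List String) (out : List String) : Decidable (Spec_commonSubstrings x L a out) := by unfold Spec_commonSubstrings; infer_instance

-- ===== CLAIM (what is proved, stated in full; the proofs are below) =====
def Claim_equal_commonSubstrings : Prop := ∀ (x : String) (L : Int) (a : List String), Dom_commonSubstrings x L a → Pre_commonSubstrings x L a → Spec_commonSubstrings x L a (commonSubstrings x L a)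

-- ===== LEMMAS AND PROOFS =====

-- 'no x[i] access out of range' in the recursion-friendly form used by the induction.
def pvOk (x : List Char) : List String → Nat → Prop
  | [], _ => True
  | op :: rest, i =>
      if PySem.Str.slice op (some 0) (some 6) = "Insert" then pvOk x rest i
      else if op = "no-op" then i < x.length ∧ pvOk x rest (i + 1)
      else pvOk x rest (i + 1)

lemma pvPre_ok (x : List Char) (a : List String) : ∀ (done : List String),
    (∀ p ∈ List.range (done ++ a).length, (done ++ a).getD p "" = "no-op" →
      ((done ++ a).take p).countP (fun op => PySem.Str.slice op (some 0) (some 6) != "Insert") < x.length) →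
    pvOk x a (done.countP (fun op => PySem.Str.slice op (some 0) (some 6) != "Insert")) := by
  induction a with
  | nil => intro done _; trivial
  | cons op rest ih =>
    intro done h
    have hassoc : done ++ op :: rest = (done ++ [op]) ++ rest := by simp
    have hget : (done ++ op :: rest).getD done.length "" = op := by
      simp [List.getD]
    have htake : (done ++ op :: rest).take done.length = done := by
      simp
    have ih' := ih (done ++ [op]) (by rw [← hassoc]; exact h)
    simp only [pvOk]
    by_cases hIns : PySem.Str.slice op (some 0) (some 6) = "Insert"
    · rw [if_pos hIns]
      have : (done ++ [op]).countP (fun op => PySem.Str.slice op (some 0) (some 6) != "Insert")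
          = done.countP (fun op => PySem.Str.slice op (some 0) (some 6) != "Insert") := by
        simp [List.countP_append, hIns]
      rwa [this] at ih'
    · rw [if_neg hIns]
      have hcnt : (done ++ [op]).countP (fun op => PySem.Str.slice op (some 0) (some 6) != "Insert")
          = done.countP (fun op => PySem.Str.slice op (some 0) (some 6) != "Insert") + 1 := by
        simp [List.countP_append, hIns]
      rw [hcnt] at ih'
      by_cases hno : op = "no-op"
      · rw [if_pos hno]
        refine ⟨?_, ih'⟩
        have := h done.length
          (by simp only [List.mem_range, List.length_append, List.length_cons]; omega)
          (by rw [hget, hno])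
        rwa [htake] at this
      · rw [if_neg hno]; exact ih'

-- the segment substring: x[start : start+n]
def pvSeg (x : List Char) (start n : Nat) : List Char :=
  PySem.List.slice x (some (start : Int)) (some ((start + n : Nat) : Int))

lemma pvSeg_eq (x : List Char) (start n : Nat) : pvSeg x start n = (x.drop start).take n := by
  rw [pvSeg, PySem.List.slice_natCast]; simp

lemma pvSeg_len (x : List Char) (start n : Nat) (h : n = 0 ∨ start + n ≤ x.length) :
    (pvSeg x start n).length = n := by
  rw [pvSeg_eq]; simp only [List.length_take, List.length_drop]; omega

lemma pvSeg_snoc (x : List Char) (start n : Nat) (c : Char)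
    (h : PySem.List.pyGet? x ((start + n : Nat) : Int) = some c) :
    pvSeg x start (n + 1) = pvSeg x start n ++ [c] := by
  rw [PySem.List.pyGet?_natCast] at h
  rw [pvSeg_eq, pvSeg_eq, List.take_add_one]
  have : (x.drop start)[n]? = some c := by rw [List.getElem?_drop]; exact h
  simp [this]

def pvRender (x : List Char) (L : Int) (segs : List (Int × Int)) : List (List Char) :=
  (segs.filter (fun p => decide (L ≤ p.2))).map
    (fun p => PySem.List.slice x (some p.1) (some (p.1 + p.2)))

lemma pvRender_snoc (x : List Char) (L : Int) (segs : List (Int × Int)) (start n : Nat) :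
    pvRender x L (segs ++ [((start : Int), (n : Int))])
      = if L ≤ (n : Int) then pvRender x L segs ++ [pvSeg x start n] else pvRender x L segs := by
  by_cases h : L ≤ (n : Int) <;>
    simp [pvRender, pvSeg, List.filter_append, List.map_append, h, Nat.cast_add]

lemma pvLoop (x : List Char) (L : Int) :
    ∀ (a : List String) (segs : List (Int × Int)) (start n i : Nat),
      pvOk x a i → start + n = i → (n = 0 ∨ i ≤ x.length) →
      pvFinishA (a.foldl (pvStepA x L) (pvRender x L segs, pvSeg x start n, (i : Int)))
        = pvFinishB x L (a.foldl pvStepB (segs, (start : Int), (n : Int), (i : Int))) := by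
  intro a
  induction a with
  | nil =>
    intro segs start n i _ hsn hn
    subst hsn
    simp [pvFinishA, pvFinishB, pvRender, pvSeg, Nat.cast_add]
  | cons op rest ih =>
    intro segs start n i hok hsn hn
    have hlen : (((pvSeg x start n).length : Nat) : Int) = ((n : Nat) : Int) := by
      exact_mod_cast congrArg Nat.cast (pvSeg_len x start n (by omega))
    simp only [List.foldl_cons]
    by_cases hIns : PySem.Str.slice op (some 0) (some 6) = "Insert"
    · have hok' : pvOk x rest i := by simpa [pvOk, hIns] using hok
      have hA : pvStepA x L (pvRender x L segs, pvSeg x start n, (i : Int)) op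
          = (pvRender x L (segs ++ [((start : Int), (n : Int))]), pvSeg x i 0, (i : Int)) := by
        simp only [pvStepA]
        rw [if_neg (by simp [hIns]), hlen, pvRender_snoc]
        simp [pvSeg_eq]
      have hB : pvStepB (segs, (start : Int), (n : Int), (i : Int)) op
          = (segs ++ [((start : Int), (n : Int))], (i : Int), ((0 : Nat) : Int), (i : Int)) := by
        simp [pvStepB, hIns]
      rw [hA, hB]
      exact ih (segs ++ [((start : Int), (n : Int))]) i 0 i hok' (by omega) (by omega)
    · by_cases hno : op = "no-op"
      · have hok' : i < x.length ∧ pvOk x rest (i + 1) := by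
          simpa [pvOk, hIns, hno] using hok
        obtain ⟨c, hc⟩ : ∃ c, PySem.List.pyGet? x ((i : Nat) : Int) = some c :=
          ⟨_, by rw [PySem.List.pyGet?_natCast]; exact List.getElem?_eq_getElem hok'.1⟩
        have hA : pvStepA x L (pvRender x L segs, pvSeg x start n, (i : Int)) op
            = (pvRender x L segs, pvSeg x start (n + 1), ((i + 1 : Nat) : Int)) := by
          simp only [pvStepA]
          rw [if_pos (by simp [hIns]), if_pos hno, hc]
          rw [pvSeg_snoc x start n c (by rw [hsn]; exact hc)]
          simp
        have hB : pvStepB (segs, (start : Int), (n : Int), (i : Int)) op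
            = (segs, (start : Int), ((n + 1 : Nat) : Int), ((i + 1 : Nat) : Int)) := by
          have hnoIns : PySem.Str.slice "no-op" (some 0) (some 6) ≠ "Insert" := by decide
          simp [pvStepB, hno, hnoIns]
        rw [hA, hB]
        exact ih segs start (n + 1) (i + 1) hok'.2 (by omega) (by omega)
      · have hok' : pvOk x rest (i + 1) := by simpa [pvOk, hIns, hno] using hok
        have hA : pvStepA x L (pvRender x L segs, pvSeg x start n, (i : Int)) op
            = (pvRender x L (segs ++ [((start : Int), (n : Int))]), pvSeg x (i + 1) 0, ((i + 1 : Nat) : Int)) := by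
          simp only [pvStepA]
          rw [if_pos (by simp [hIns]), if_neg hno, hlen, pvRender_snoc]
          simp [pvSeg_eq]
        have hB : pvStepB (segs, (start : Int), (n : Int), (i : Int)) op
            = (segs ++ [((start : Int), (n : Int))], ((i + 1 : Nat) : Int), ((0 : Nat) : Int), ((i + 1 : Nat) : Int)) := by
          simp [pvStepB, hIns, hno]
        rw [hA, hB]
        exact ih (segs ++ [((start : Int), (n : Int))]) (i + 1) 0 (i + 1) hok' (by omega) (by omega)

-- ===== VERDICT (by name: the statement is the Claim_ definition above) =====
theorem commonSubstrings_spec : Claim_equal_commonSubstrings := by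
  intro x L a _ hpre
  unfold Spec_commonSubstrings commonSubstrings commonSubstrings_alt
  have hok : pvOk x.toList a 0 := by
    have hp := hpre
    unfold Pre_commonSubstrings at hp
    have := pvPre_ok x.toList a [] (by simpa using hp)
    simpa using this
  have := pvLoop x.toList L a [] 0 0 0 hok rfl (Or.inl rfl)
  exact congrArg (List.map String.ofList) (by simpa [pvRender, pvSeg_eq] using this)
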